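-- pv_equiv track=rewrite | github.com/angusnimmo/projectEuler | 070.py | is_permutation
-- ===== SOURCE A (Python) =====
-- def is_permutation(a: int, b: int) -> bool:
--     A = [int(x) for x in str(a)]
--     B = [int(x) for x in str(b)]
--     count = [0 for _ in range(10)]
--
--     if len(A) != len(B):
--         return False
--     else:
--         for i in range(len(A)):
--             count[A[i]] += 1
--             count[B[i]] -= 1
--
--     return all(x == 0 for x in count)
-- ===== SOURCE B (Python) =====
-- def is_permutation(a: int, b: int) -> bool:
--     A = [int(x) for x in str(a)]
--     B = [int(x) for x in str(b)]
--     return sorted(A) == sorted(B)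
-- ===== Notes on version B (the rewrite author's own statement) =====
-- stated objective: simpler
-- what changed: Replaced the 10-bucket increment/decrement histogram loop and zero-check with sorting both digit lists and comparing them for equality.
import Mathlib
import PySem

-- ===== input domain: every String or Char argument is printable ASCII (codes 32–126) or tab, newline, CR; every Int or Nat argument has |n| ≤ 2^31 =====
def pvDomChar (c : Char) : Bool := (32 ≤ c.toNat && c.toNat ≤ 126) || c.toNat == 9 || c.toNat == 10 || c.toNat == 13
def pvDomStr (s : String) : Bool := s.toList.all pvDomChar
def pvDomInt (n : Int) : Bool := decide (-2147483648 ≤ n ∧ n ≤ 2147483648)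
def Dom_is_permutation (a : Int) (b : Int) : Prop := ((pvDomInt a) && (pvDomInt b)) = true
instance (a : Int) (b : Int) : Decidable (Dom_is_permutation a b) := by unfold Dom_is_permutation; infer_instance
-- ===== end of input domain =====

-- B replaces A's 10-bucket increment/decrement digit histogram with sorting both
-- digit lists and comparing them (simpler, same result on all nonnegative inputs).


-- ===== PORT A =====
-- [int(x) for x in str(n)] — shared digit extraction of both Pythons.
-- int(x) is PySem.Int.ofChars? [x]; the .getD 0 is never taken under Pre_ (0 ≤ n:
-- every character of str(n) is then a decimal digit, so int(x) returns normally).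
def pyDigits (n : Int) : List Int :=
  (PySem.Int.toChars n).map (fun x => (PySem.Int.ofChars? [x]).getD 0)

def is_permutation (a : Int) (b : Int) : Bool :=
  let A := pyDigits a
  let B := pyDigits b
  let count := (PySem.List.pyRange 0 10 1).map (fun _ => (0 : Int))
  if A.length ≠ B.length then false
  else
    let count := (PySem.List.pyRange 0 (PySem.List.len A) 1).foldl
      (fun c i =>
        let c := PySem.List.pySetD c (PySem.List.pyGetD A i 0)
                   (PySem.List.pyGetD c (PySem.List.pyGetD A i 0) 0 + 1)
        PySem.List.pySetD c (PySem.List.pyGetD B i 0)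
          (PySem.List.pyGetD c (PySem.List.pyGetD B i 0) 0 - 1)) count
    count.all (fun x => x == 0)

-- ===== PORT B =====
def is_permutation_alt (a : Int) (b : Int) : Bool :=
  let A := PySem.List.sorted (pyDigits a) (fun x => x) false
  let B := PySem.List.sorted (pyDigits b) (fun x => x) false
  decide (A = B)

-- ===== PRECONDITION & SPEC =====
-- Pre_ excludes exactly the inputs where both Pythons raise ValueError:
-- for a negative argument str(n) starts with '-' and int('-') raises.
def Pre_is_permutation (a : Int) (b : Int) : Prop := 0 ≤ a ∧ 0 ≤ b
instance (a : Int) (b : Int) : Decidable (Pre_is_permutation a b) := by unfold Pre_is_permutation; infer_instance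
def pvWitness_is_permutation : Int × Int := (1203, 2031)

def Spec_is_permutation (a : Int) (b : Int) (out : Bool) : Prop := out = is_permutation_alt a b
instance (a : Int) (b : Int) (out : Bool) : Decidable (Spec_is_permutation a b out) := by unfold Spec_is_permutation; infer_instance

-- ===== CLAIM (what is proved, stated in full; the proofs are below) =====
def Claim_equal_is_permutation : Prop := ∀ (a : Int) (b : Int), Dom_is_permutation a b → Pre_is_permutation a b → Spec_is_permutation a b (is_permutation a b)

-- ===== LEMMAS AND PROOFS =====

-- every char of Nat.toDigits 10 n is a decimal digit
lemma toDigitsCore_digits (f n : Nat) (ds : List Char) (c : Char)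
    (hc : c ∈ Nat.toDigitsCore 10 f n ds) :
    c ∈ ds ∨ c ∈ ['0','1','2','3','4','5','6','7','8','9'] := by
  induction f generalizing n ds with
  | zero => exact Or.inl hc
  | succ f ih =>
    simp only [Nat.toDigitsCore] at hc
    have hd : Nat.digitChar (n % 10) ∈ ['0','1','2','3','4','5','6','7','8','9'] := by
      have : n % 10 < 10 := Nat.mod_lt _ (by omega)
      interval_cases h : n % 10 <;> simp [Nat.digitChar]
    split at hc
    · rcases List.mem_cons.mp hc with h | h
      · exact Or.inr (h ▸ hd)
      · exact Or.inl h
    · rcases ih _ _ hc with h | h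
      · rcases List.mem_cons.mp h with h | h
        · exact Or.inr (h ▸ hd)
        · exact Or.inl h
      · exact Or.inr h

lemma pyDigits_bounds (n : Int) (hn : 0 ≤ n) :
    ∀ x ∈ pyDigits n, 0 ≤ x ∧ x < 10 := by
  intro x hx
  simp only [pyDigits, List.mem_map] at hx
  obtain ⟨c, hc, rfl⟩ := hx
  have hcd : c ∈ ['0','1','2','3','4','5','6','7','8','9'] := by
    simp only [PySem.Int.toChars, if_neg (by omega : ¬ n < 0), Nat.toDigits] at hc
    rcases toDigitsCore_digits _ _ _ _ hc with h | h
    · simp at h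
    · exact h
  fin_cases hcd <;> decide

-- one step of A's loop
def pvStep (c : List Int) (x y : Int) : List Int :=
  let c := PySem.List.pySetD c x (PySem.List.pyGetD c x 0 + 1)
  PySem.List.pySetD c y (PySem.List.pyGetD c y 0 - 1)

lemma length_pvStep (c : List Int) (x y : Int) : (pvStep c x y).length = c.length := by
  simp [pvStep, PySem.List.length_pySetD]

lemma length_foldl_pvStep (ps : List (Int × Int)) (c : List Int) :
    (ps.foldl (fun c p => pvStep c p.1 p.2) c).length = c.length := by
  induction ps generalizing c with
  | nil => rfl
  | cons p t ih => simp [List.foldl_cons, ih, length_pvStep]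

-- A's index loop over equal-length lists is the fold of pvStep over their zip
lemma loop_eq_zip (L1 : List Int) : ∀ (L2 : List Int) (c : List Int),
    L1.length = L2.length →
    (PySem.List.pyRange 0 (PySem.List.len L1) 1).foldl
      (fun c i => pvStep c (PySem.List.pyGetD L1 i 0) (PySem.List.pyGetD L2 i 0)) c
    = (L1.zip L2).foldl (fun c p => pvStep c p.1 p.2) c := by
  induction L1 using List.reverseRecOn with
  | nil => intro L2 c h; simp [PySem.List.pyRange_one_eq_nil]
  | append_singleton xs x ih =>
    intro L2 c h
    rcases List.eq_nil_or_concat L2 with rfl | ⟨ys, y, rfl⟩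
    · simp at h
    · simp only [List.concat_eq_append] at h ⊢
      have hlen : xs.length = ys.length := by
        simp at h; omega
      have hsplit : PySem.List.pyRange 0 (PySem.List.len (xs ++ [x])) 1
          = PySem.List.pyRange 0 (xs.length : Int) 1 ++ [(xs.length : Int)] := by
        rw [PySem.List.len_eq]
        simp only [List.length_append, List.length_cons, List.length_nil]
        rw [show ((xs.length + 1 : Nat) : Int) = (xs.length : Int) + 1 by push_cast; ring]
        exact PySem.List.pyRange_one_succ_right (by positivity)
      rw [hsplit, List.foldl_append]
      have hcongr : ∀ (c : List Int),
          (PySem.List.pyRange 0 (xs.length : Int) 1).foldl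
            (fun c i => pvStep c (PySem.List.pyGetD (xs ++ [x]) i 0) (PySem.List.pyGetD (ys ++ [y]) i 0)) c
          = (PySem.List.pyRange 0 (xs.length : Int) 1).foldl
            (fun c i => pvStep c (PySem.List.pyGetD xs i 0) (PySem.List.pyGetD ys i 0)) c := by
        intro c
        apply PySem.List.foldl_congr_mem
        intro acc i hi
        have hib := (PySem.List.mem_pyRange_one).mp hi
        have hi' : i.toNat < xs.length := by omega
        have hi'' : i.toNat < ys.length := by omega
        have h1 : PySem.List.pyGetD (xs ++ [x]) i 0 = PySem.List.pyGetD xs i 0 := by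
          rw [PySem.List.pyGetD_eq_getElem (xs ++ [x]) 0 (by omega) (by simp; omega),
              PySem.List.pyGetD_eq_getElem xs 0 (by omega) (by omega)]
          exact List.getElem_append_left hi'
        have h2 : PySem.List.pyGetD (ys ++ [y]) i 0 = PySem.List.pyGetD ys i 0 := by
          rw [PySem.List.pyGetD_eq_getElem (ys ++ [y]) 0 (by omega) (by simp; omega),
              PySem.List.pyGetD_eq_getElem ys 0 (by omega) (by omega)]
          exact List.getElem_append_left hi''
        rw [h1, h2]
      rw [hcongr]
      have hx : PySem.List.pyGetD (xs ++ [x]) (xs.length : Int) 0 = x := by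
        rw [PySem.List.pyGetD_eq_getElem (xs ++ [x]) 0 (by positivity) (by simp)]
        simp
      have hy : PySem.List.pyGetD (ys ++ [y]) (xs.length : Int) 0 = y := by
        rw [PySem.List.pyGetD_eq_getElem (ys ++ [y]) 0 (by positivity) (by simp; omega)]
        simp [hlen]
      have hzip : (xs ++ [x]).zip (ys ++ [y]) = xs.zip ys ++ [(x, y)] := by
        rw [List.zip_append hlen]; rfl
      rw [hzip, List.foldl_append]
      have ih' := ih ys c hlen
      rw [PySem.List.len_eq] at ih'
      rw [ih']
      simp only [List.foldl_cons, List.foldl_nil, hx, hy]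

-- the value of one bucket after the zip fold
lemma zipfold_count (ps : List (Int × Int)) : ∀ (c : List Int), c.length = 10 →
    (∀ p ∈ ps, (0 ≤ p.1 ∧ p.1 < 10) ∧ (0 ≤ p.2 ∧ p.2 < 10)) →
    ∀ (v : Int), 0 ≤ v → v < 10 →
    PySem.List.pyGetD (ps.foldl (fun c p => pvStep c p.1 p.2) c) v 0
      = PySem.List.pyGetD c v 0 + ((ps.map Prod.fst).count v : Int) - ((ps.map Prod.snd).count v : Int) := by
  induction ps with
  | nil => intro c hc hb v hv0 hv10; simp
  | cons p t ih =>
    intro c hc hb v hv0 hv10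
    rcases p with ⟨x, y⟩
    obtain ⟨⟨hx0, hx10⟩, hy0, hy10⟩ := hb (x, y) (List.mem_cons_self ..)
    lift x to ℕ using hx0
    lift y to ℕ using hy0
    lift v to ℕ using hv0
    have hx10' : x < 10 := by omega
    have hy10' : y < 10 := by omega
    have hv10' : v < 10 := by omega
    have hstep : PySem.List.pyGetD (pvStep c x y) (v : Int) 0
        = PySem.List.pyGetD c (v : Int) 0 + (if v = x then 1 else 0) - (if v = y then 1 else 0) := by
      simp only [pvStep]
      rw [PySem.List.pyGetD_pySetD_natCast _ y v _ _ (by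
            rw [PySem.List.length_pySetD, hc]; exact hy10'),
          PySem.List.pyGetD_pySetD_natCast _ x y _ _ (by rw [hc]; exact hx10'),
          PySem.List.pyGetD_pySetD_natCast _ x v _ _ (by rw [hc]; exact hx10')]
      split_ifs <;> simp_all
    have hlen' : (pvStep c (x : Int) (y : Int)).length = 10 := by
      rw [length_pvStep, hc]
    have hbt : ∀ q ∈ t, ((0:Int) ≤ q.1 ∧ q.1 < 10) ∧ ((0:Int) ≤ q.2 ∧ q.2 < 10) :=
      fun q hq => hb q (List.mem_cons_of_mem _ hq)
    simp only [List.foldl_cons]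
    rw [ih (pvStep c x y) hlen' hbt (v : Int) (by positivity) hv10, hstep]
    simp only [List.map_cons, List.count_cons]
    push_cast
    split_ifs with h1 h2 h2 <;> simp_all <;> ring

-- characterisation of A's histogram check on equal-length digit lists: multiset equality
lemma histo_eq_perm (L1 L2 : List Int)
    (hb1 : ∀ x ∈ L1, 0 ≤ x ∧ x < 10) (hb2 : ∀ x ∈ L2, 0 ≤ x ∧ x < 10)
    (hlen : L1.length = L2.length) :
    (((L1.zip L2).foldl (fun c p => pvStep c p.1 p.2)
        ((PySem.List.pyRange 0 10 1).map (fun _ => (0 : Int)))).all (fun x => x == 0))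
      = decide (L1.Perm L2) := by
  have hinit : ((PySem.List.pyRange 0 10 1).map (fun _ => (0 : Int))) = List.replicate 10 0 := by
    decide
  have hbz : ∀ p ∈ L1.zip L2, ((0:Int) ≤ p.1 ∧ p.1 < 10) ∧ ((0:Int) ≤ p.2 ∧ p.2 < 10) := by
    intro p hp
    rcases p with ⟨u, w⟩
    have := List.of_mem_zip hp
    exact ⟨hb1 u this.1, hb2 w this.2⟩
  set R := (L1.zip L2).foldl (fun c p => pvStep c p.1 p.2)
      ((PySem.List.pyRange 0 10 1).map (fun _ => (0 : Int))) with hR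
  have hRlen : R.length = 10 := by
    rw [hR, length_foldl_pvStep]; decide
  have hRv : ∀ v : Int, 0 ≤ v → v < 10 →
      PySem.List.pyGetD R v 0 = (L1.count v : Int) - (L2.count v : Int) := by
    intro v hv0 hv10
    rw [hR, zipfold_count _ _ (by decide) hbz v hv0 hv10,
        List.map_fst_zip (by omega), List.map_snd_zip (by omega)]
    have : PySem.List.pyGetD ((PySem.List.pyRange 0 10 1).map (fun _ => (0 : Int))) v 0 = 0 := by
      rw [hinit, PySem.List.pyGetD_eq_getElem _ 0 hv0 (by simp; omega)]
      exact List.eq_of_mem_replicate (List.getElem_mem _)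
    rw [this]; ring
  rw [Bool.eq_iff_iff]
  simp only [List.all_eq_true, beq_iff_eq, decide_eq_true_eq]
  constructor
  · intro hall
    rw [List.perm_iff_count]
    intro v
    by_cases hv : 0 ≤ v ∧ v < 10
    · have hmem : PySem.List.pyGetD R v 0 ∈ R := by
        apply PySem.List.pyGetD_mem
        constructor <;> omega
      have := hall _ hmem
      rw [hRv v hv.1 hv.2] at this
      omega
    · have h1 : L1.count v = 0 := by
        rw [List.count_eq_zero]
        intro hmem
        exact hv ⟨(hb1 v hmem).1, (hb1 v hmem).2⟩
      have h2 : L2.count v = 0 := by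
        rw [List.count_eq_zero]
        intro hmem
        exact hv ⟨(hb2 v hmem).1, (hb2 v hmem).2⟩
      rw [h1, h2]
  · intro hperm x hx
    obtain ⟨k, hk, rfl⟩ := List.mem_iff_getElem.mp hx
    have hk10 : k < 10 := by omega
    have := hRv (k : Int) (by positivity) (by exact_mod_cast hk10)
    rw [PySem.List.pyGetD_eq_getElem _ 0 (by positivity) (by simp; omega)] at this
    simp only [Int.toNat_natCast] at this
    rw [this, List.perm_iff_count.mp hperm]
    ring

-- B's sorted comparison also decides multiset equality
lemma sorted_eq_perm (L1 L2 : List Int) :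
    (decide ((PySem.List.sorted L1 (fun x => x) false) = (PySem.List.sorted L2 (fun x => x) false)))
      = decide (L1.Perm L2) := by
  rw [Bool.eq_iff_iff]
  simp only [decide_eq_true_eq]
  exact PySem.List.sorted_id_eq_sorted_id_iff_perm L1 L2

-- ===== VERDICT (by name: the statement is the Claim_ definition above) =====
theorem is_permutation_spec : Claim_equal_is_permutation := by
  intro a b hdom hpre
  obtain ⟨ha, hb⟩ := hpre
  unfold Spec_is_permutation
  show is_permutation a b = is_permutation_alt a b
  unfold is_permutation is_permutation_alt
  simp only []
  by_cases hlen : (pyDigits a).length = (pyDigits b).length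
  · rw [if_neg (by omega)]
    have hfun : (fun (c : List Int) (i : Int) =>
        let c' := PySem.List.pySetD c (PySem.List.pyGetD (pyDigits a) i 0)
                   (PySem.List.pyGetD c (PySem.List.pyGetD (pyDigits a) i 0) 0 + 1)
        PySem.List.pySetD c' (PySem.List.pyGetD (pyDigits b) i 0)
          (PySem.List.pyGetD c' (PySem.List.pyGetD (pyDigits b) i 0) 0 - 1))
        = (fun c i => pvStep c (PySem.List.pyGetD (pyDigits a) i 0) (PySem.List.pyGetD (pyDigits b) i 0)) := rfl
    rw [hfun, loop_eq_zip _ _ _ hlen,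
        histo_eq_perm _ _ (pyDigits_bounds a ha) (pyDigits_bounds b hb) hlen,
        sorted_eq_perm]
  · rw [if_pos (by omega)]
    symm
    rw [decide_eq_false_iff_not]
    intro hEq
    apply hlen
    have := congrArg List.length hEq
    simpa [PySem.List.length_sorted] using this
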